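-- pv_equiv track=rewrite | github.com/Wellan76/code-de-vigen-re | Projet_info_n1.py | IC4
-- ===== SOURCE A (Python) =====
-- def IC4(a:int):
--     str = ""
--     sous_chaine = []
--     for j in range(0,4):
--         for i in range(j,len(a),4):
--             str = str + a[i]
--         sous_chaine.append(str)
--         str = ""
--     return sous_chaine
-- ===== SOURCE B (Python) =====
-- def IC4(a):
--     s0 = s1 = s2 = s3 = ""
--     for k in range(0, len(a), 4):
--         chunk = a[k:k+4]
--         s0 += chunk[0:1]
--         s1 += chunk[1:2]
--         s2 += chunk[2:3]
--         s3 += chunk[3:4]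
--     return [s0, s1, s2, s3]
-- ===== Notes on version B (the rewrite author's own statement) =====
-- stated objective: alternative
-- what changed: Replaces A's four residue-by-residue passes over the whole string (nested loops over range(j, len(a), 4) for j = 0..3) with a single pass over 4-character chunks (range(0, len(a), 4)) that extends all four accumulators at once, so the string is traversed once instead of four times.
import Mathlib
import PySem

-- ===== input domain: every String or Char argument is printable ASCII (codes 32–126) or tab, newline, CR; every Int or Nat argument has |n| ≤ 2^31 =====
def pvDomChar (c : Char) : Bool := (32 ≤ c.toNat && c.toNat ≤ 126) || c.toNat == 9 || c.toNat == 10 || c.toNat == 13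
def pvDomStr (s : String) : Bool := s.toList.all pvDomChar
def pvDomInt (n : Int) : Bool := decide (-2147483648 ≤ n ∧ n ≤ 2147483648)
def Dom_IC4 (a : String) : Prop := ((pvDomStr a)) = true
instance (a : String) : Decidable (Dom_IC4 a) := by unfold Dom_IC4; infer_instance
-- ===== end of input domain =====

-- B replaces A's four residue-by-residue passes with one chunk-of-4 structural recursion; objective: alternative decomposition (same cost).

-- ===== PORT A =====
-- literal port of A: outer loop 'for j in range(0,4)', inner 'for i in range(j,len(a),4): str = str + a[i]'
def IC4 (a : String) : List String :=
  let l := a.toList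
  let st :=
    (PySem.List.pyRange 0 4 1).foldl
      (fun (st : List Char × List String) j =>
        let s := (PySem.List.pyRange j (l.length : Int) 4).foldl
                   (fun s i => s ++ [PySem.List.pyGetD l i ' ']) st.1
        ([], st.2 ++ [String.ofList s]))
      ([], [])
  st.2

-- ===== PORT B =====
-- port of Source B: one pass over range(0, len(a), 4); chunk = a[k:k+4], each result gets chunk[t:t+1]
def IC4_alt (a : String) : List String :=
  let l := a.toList
  let st :=
    (PySem.List.pyRange 0 (l.length : Int) 4).foldl
      (fun (st : List Char × List Char × List Char × List Char) k =>
        let chunk := PySem.List.slice l (some k) (some (k + 4))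
        (st.1 ++ PySem.List.slice chunk (some 0) (some 1),
         st.2.1 ++ PySem.List.slice chunk (some 1) (some 2),
         st.2.2.1 ++ PySem.List.slice chunk (some 2) (some 3),
         st.2.2.2 ++ PySem.List.slice chunk (some 3) (some 4)))
      ([], [], [], [])
  [String.ofList st.1, String.ofList st.2.1, String.ofList st.2.2.1, String.ofList st.2.2.2]

-- ===== PRECONDITION & SPEC =====
def Spec_IC4 (a : String) (out : List String) : Prop := out = IC4_alt a
instance (a : String) (out : List String) : Decidable (Spec_IC4 a out) := by unfold Spec_IC4; infer_instance

-- ===== CLAIM (what is proved, stated in full; the proofs are below) =====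
def Claim_equal_IC4 : Prop := ∀ (a : String), Dom_IC4 a → Spec_IC4 a (IC4 a)

-- ===== LEMMAS AND PROOFS =====

-- the common value: every 4th character of l, starting at its head
def every4 : List Char → List Char
  | [] => []
  | c :: t => c :: every4 (t.drop 3)
termination_by l => l.length
decreasing_by simp

lemma pyRange4_nil (a b : Int) (h : b ≤ a) : PySem.List.pyRange a b 4 = [] := by
  rw [PySem.List.pyRange_of_pos a b (by norm_num)]
  rw [if_neg (by omega)]
  simp

lemma pyRange4_cons (a b : Int) (h : a < b) :
    PySem.List.pyRange a b 4 = a :: PySem.List.pyRange (a + 4) b 4 := by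
  rw [PySem.List.pyRange_of_pos a b (by norm_num),
      PySem.List.pyRange_of_pos (a + 4) b (by norm_num)]
  have hc : ((b - a + 4 - 1) / 4).toNat
      = (if a + 4 < b then ((b - (a + 4) + 4 - 1) / 4).toNat else 0) + 1 := by
    split_ifs <;> omega
  rw [if_pos h, hc, List.range_succ_eq_map, List.map_cons, List.map_map]
  congr 1
  · ring
  · apply List.map_congr_left
    intro k _
    simp [Function.comp]
    ring

lemma innerA (l : List Char) (k : Nat) :
    ∀ (j : Int) (acc : List Char), 0 ≤ j → l.length - j.toNat ≤ k →
    (PySem.List.pyRange j (l.length : Int) 4).foldl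
        (fun s i => s ++ [PySem.List.pyGetD l i ' ']) acc
      = acc ++ every4 (l.drop j.toNat) := by
  induction k with
  | zero =>
    intro j acc hj hk
    rw [pyRange4_nil _ _ (by omega)]
    have : l.drop j.toNat = [] := List.drop_eq_nil_of_le (by omega)
    simp [this, every4]
  | succ k ih =>
    intro j acc hj hk
    by_cases hlt : j < (l.length : Int)
    · have hjn : j.toNat < l.length := by omega
      rw [pyRange4_cons _ _ hlt, List.foldl_cons,
          ih (j + 4) _ (by omega) (by omega)]
      have hget : PySem.List.pyGetD l j ' ' = l[j.toNat] :=
        PySem.List.pyGetD_eq_getElem _ _ hj hlt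
      have hd : l.drop j.toNat = l[j.toNat] :: l.drop (j.toNat + 1) :=
        List.drop_eq_getElem_cons hjn
      have hdd : (l.drop (j.toNat + 1)).drop 3 = l.drop (j + 4).toNat := by
        rw [List.drop_drop]
        congr 1
        omega
      rw [hd, every4, hdd, hget]
      simp
    · rw [pyRange4_nil _ _ (by omega)]
      have : l.drop j.toNat = [] := List.drop_eq_nil_of_le (by omega)
      simp [this, every4]

lemma take1_every4 (t : List Char) (m : Nat) :
    (t.drop m).take 1 ++ every4 (t.drop (m + 4)) = every4 (t.drop m) := by
  have hdd : t.drop (m + 4) = (t.drop m).drop 4 := by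
    rw [List.drop_drop]
  cases h : t.drop m with
  | nil => simp [hdd, h, every4]
  | cons d u =>
    rw [hdd, h]
    simp [every4]

lemma innerB (l : List Char) (k : Nat) :
    ∀ (j : Int) (s0 s1 s2 s3 : List Char), 0 ≤ j → l.length - j.toNat ≤ k →
    (PySem.List.pyRange j (l.length : Int) 4).foldl
      (fun (st : List Char × List Char × List Char × List Char) k =>
        let chunk := PySem.List.slice l (some k) (some (k + 4))
        (st.1 ++ PySem.List.slice chunk (some 0) (some 1),
         st.2.1 ++ PySem.List.slice chunk (some 1) (some 2),
         st.2.2.1 ++ PySem.List.slice chunk (some 2) (some 3),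
         st.2.2.2 ++ PySem.List.slice chunk (some 3) (some 4)))
      (s0, s1, s2, s3)
      = (s0 ++ every4 (l.drop j.toNat), s1 ++ every4 (l.drop (j.toNat + 1)),
         s2 ++ every4 (l.drop (j.toNat + 2)), s3 ++ every4 (l.drop (j.toNat + 3))) := by
  induction k with
  | zero =>
    intro j s0 s1 s2 s3 hj hk
    rw [pyRange4_nil _ _ (by omega)]
    have h0 : l.drop j.toNat = [] := List.drop_eq_nil_of_le (by omega)
    have h1 : l.drop (j.toNat + 1) = [] := List.drop_eq_nil_of_le (by omega)
    have h2 : l.drop (j.toNat + 2) = [] := List.drop_eq_nil_of_le (by omega)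
    have h3 : l.drop (j.toNat + 3) = [] := List.drop_eq_nil_of_le (by omega)
    simp [h0, h1, h2, h3, every4]
  | succ k ih =>
    intro j s0 s1 s2 s3 hj hk
    by_cases hlt : j < (l.length : Int)
    · rw [pyRange4_cons _ _ hlt, List.foldl_cons]
      dsimp only
      have hch : PySem.List.slice l (some j) (some (j + 4)) = (l.drop j.toNat).take 4 := by
        rw [PySem.List.slice_toNat _ hj (by omega)]
        congr 1
        omega
      have c0 : PySem.List.slice ((l.drop j.toNat).take 4) (some 0) (some 1)
          = (l.drop j.toNat).take 1 := by
        rw [PySem.List.slice_toNat _ (by norm_num) (by norm_num)]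
        simp [List.take_take]
      have c1 : PySem.List.slice ((l.drop j.toNat).take 4) (some 1) (some 2)
          = (l.drop (j.toNat + 1)).take 1 := by
        rw [PySem.List.slice_toNat _ (by norm_num) (by norm_num)]
        simp [List.drop_take, List.drop_drop, List.take_take]
      have c2 : PySem.List.slice ((l.drop j.toNat).take 4) (some 2) (some 3)
          = (l.drop (j.toNat + 2)).take 1 := by
        rw [PySem.List.slice_toNat _ (by norm_num) (by norm_num)]
        simp [List.drop_take, List.drop_drop, List.take_take]
      have c3 : PySem.List.slice ((l.drop j.toNat).take 4) (some 3) (some 4)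
          = (l.drop (j.toNat + 3)).take 1 := by
        rw [PySem.List.slice_toNat _ (by norm_num) (by norm_num)]
        simp [List.drop_take, List.drop_drop, List.take_take]
      rw [hch, c0, c1, c2, c3, ih (j + 4) _ _ _ _ (by omega) (by omega)]
      have e4 : (j + 4).toNat = j.toNat + 4 := by omega
      simp only [e4, Prod.mk.injEq, List.append_assoc]
      refine ⟨?_, ?_, ?_, ?_⟩
      · exact congrArg (s0 ++ ·) (by simpa using take1_every4 l j.toNat)
      · exact congrArg (s1 ++ ·) (by
          have := take1_every4 l (j.toNat + 1)
          simpa [Nat.add_assoc, Nat.add_comm, Nat.add_left_comm] using this)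
      · exact congrArg (s2 ++ ·) (by
          have := take1_every4 l (j.toNat + 2)
          simpa [Nat.add_assoc, Nat.add_comm, Nat.add_left_comm] using this)
      · exact congrArg (s3 ++ ·) (by
          have := take1_every4 l (j.toNat + 3)
          simpa [Nat.add_assoc, Nat.add_comm, Nat.add_left_comm] using this)
    · rw [pyRange4_nil _ _ (by omega)]
      have h0 : l.drop j.toNat = [] := List.drop_eq_nil_of_le (by omega)
      have h1 : l.drop (j.toNat + 1) = [] := List.drop_eq_nil_of_le (by omega)
      have h2 : l.drop (j.toNat + 2) = [] := List.drop_eq_nil_of_le (by omega)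
      have h3 : l.drop (j.toNat + 3) = [] := List.drop_eq_nil_of_le (by omega)
      simp [h0, h1, h2, h3, every4]

lemma range04 : PySem.List.pyRange 0 4 1 = [0, 1, 2, 3] := by decide

-- ===== VERDICT (by name: the statement is the Claim_ definition above) =====
theorem IC4_spec : Claim_equal_IC4 := by
  intro a _
  unfold Spec_IC4 IC4 IC4_alt
  set l := a.toList with hl
  rw [range04]
  simp only [List.foldl_cons, List.foldl_nil]
  have h0 := innerA l l.length 0 [] (by omega) (by omega)
  have h1 := innerA l l.length 1 [] (by omega) (by omega)
  have h2 := innerA l l.length 2 [] (by omega) (by omega)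
  have h3 := innerA l l.length 3 [] (by omega) (by omega)
  have hB := innerB l l.length 0 [] [] [] [] (by omega) (by omega)
  simp only [Int.toNat_zero, Int.toNat_one, List.drop_zero, List.nil_append,
    Nat.zero_add, PySem.List.slice_zero_start] at h0 h1 h2 h3 hB
  simp [h0, h1, h2, h3, hB]
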